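-- pv_equiv track=rewrite | github.com/moolivieJHB/wtc-projects | submission_001-problem/course.py | mappingfunc
-- ===== SOURCE A (Python) =====
-- def mappingfunc(s):
--     counter=0
--     output=''
--
--     for i in s:
--         if counter==0:
--             output =output +str(i) +'.'
--             counter= counter +1
--         elif counter==1:
--             output= output + str(i) +'- '
--             counter= counter +1
--         elif counter==2:
--             output= output + str(i) +'- '
--             counter = counter+1
--         elif counter==3:
--             output= output + str(i)
--             counter = counter+1
--         elif counter==4:
--             output= output + ('[{}]\n'.format(i))
--     return output
-- ===== SOURCE B (Python) =====
-- def mappingfunc(s):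
--     seps = ['.', '- ', '- ', '']
--     def fmt(lst, off):
--         if len(lst) == 1:
--             v = str(lst[0])
--             return v + seps[off] if off < 4 else '[{}]\n'.format(v)
--         mid = len(lst) // 2
--         return fmt(lst[:mid], off) + fmt(lst[mid:], off + mid)
--     lst = list(s)
--     return fmt(lst, 0) if lst else ''
-- ===== Notes on version B (the rewrite author's own statement) =====
-- stated objective: alternative
-- what changed: Replaces A's single counter-driven loop with a five-way if/elif chain by a divide-and-conquer recursion that splits the list in half, formats each half independently from its starting offset, and concatenates the two halves.
import Mathlib
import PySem

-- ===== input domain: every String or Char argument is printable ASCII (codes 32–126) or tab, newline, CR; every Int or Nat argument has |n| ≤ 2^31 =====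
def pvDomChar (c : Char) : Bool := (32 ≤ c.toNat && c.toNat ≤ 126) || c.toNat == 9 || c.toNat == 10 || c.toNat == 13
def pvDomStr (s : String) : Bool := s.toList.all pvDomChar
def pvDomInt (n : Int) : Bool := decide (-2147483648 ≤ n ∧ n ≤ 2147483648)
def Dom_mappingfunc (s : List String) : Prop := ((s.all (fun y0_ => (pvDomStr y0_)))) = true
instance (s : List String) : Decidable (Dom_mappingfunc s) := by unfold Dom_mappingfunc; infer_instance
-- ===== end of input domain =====

-- B replaces A's counter-driven loop/if-elif chain by a divide-and-conquer recursion on list halves (objective: alternative).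


-- ===== PORT A =====
-- one step of A's loop body: update output then counter, same branch order as the Python
def mfStep (st : Int × String) (i : String) : Int × String :=
  if st.1 = 0 then (st.1 + 1, st.2 ++ i ++ ".")
  else if st.1 = 1 then (st.1 + 1, st.2 ++ i ++ "- ")
  else if st.1 = 2 then (st.1 + 1, st.2 ++ i ++ "- ")
  else if st.1 = 3 then (st.1 + 1, st.2 ++ i)
  else if st.1 = 4 then (st.1, st.2 ++ ("[" ++ i ++ "]\n"))
  else st

def mappingfunc (s : List String) : String :=
  (s.foldl mfStep (0, "")).2

-- ===== PORT B =====
def mfSeps : List String := [".", "- ", "- ", ""]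

-- Source B's 'fmt': divide and conquer on list halves; [] case added only for totality (Source B never calls fmt on [])
def mfFmt (lst : List String) (off : Nat) : String :=
  match lst with
  | [] => ""
  | [v] => if off < 4 then v ++ mfSeps.getD off "" else "[" ++ v ++ "]\n"
  | a :: b :: t =>
      let l := a :: b :: t
      let mid := l.length / 2
      mfFmt (l.take mid) off ++ mfFmt (l.drop mid) (off + mid)
termination_by lst.length
decreasing_by
  · simp [List.length_take]; omega
  · simp [List.length_drop]; omega

def mappingfunc_alt (s : List String) : String :=
  match s with
  | [] => ""
  | _ => mfFmt s 0

-- ===== PRECONDITION & SPEC =====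
def Spec_mappingfunc (s : List String) (out : String) : Prop := out = mappingfunc_alt s
instance (s : List String) (out : String) : Decidable (Spec_mappingfunc s out) := by unfold Spec_mappingfunc; infer_instance

-- ===== CLAIM (what is proved, stated in full; the proofs are below) =====
def Claim_equal_mappingfunc : Prop := ∀ (s : List String), Dom_mappingfunc s → Spec_mappingfunc s (mappingfunc s)

-- ===== LEMMAS AND PROOFS =====
-- reference rendering: one piece per element at its absolute position
def mfPiece (v : String) (off : Nat) : String :=
  if off < 4 then v ++ mfSeps.getD off "" else "[" ++ v ++ "]\n"

def mfStraight : List String → Nat → String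
  | [], _ => ""
  | v :: t, off => mfPiece v off ++ mfStraight t (off + 1)

theorem mfStraight_append (l1 l2 : List String) (off : Nat) :
    mfStraight (l1 ++ l2) off = mfStraight l1 off ++ mfStraight l2 (off + l1.length) := by
  induction l1 generalizing off with
  | nil => simp [mfStraight]
  | cons a t ih =>
      simp [mfStraight, ih, String.append_assoc]
      ring_nf

theorem mfFmt_eq_straight (lst : List String) (off : Nat) :
    mfFmt lst off = mfStraight lst off := by
  fun_induction mfFmt lst off with
  | case1 off => simp [mfStraight]
  | case2 off v h => simp [mfStraight, mfPiece, h]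
  | case3 off v h =>
      simp [mfStraight, mfPiece]
      exact fun h2 => absurd h2 (by omega)
  | case4 off a b t l mid ih1 ih2 =>
      rw [ih1, ih2]
      have h : mid ≤ (a :: b :: t).length := Nat.div_le_self _ _
      conv_rhs => rw [← List.take_append_drop mid (a :: b :: t)]
      rw [mfStraight_append, List.length_take, Nat.min_eq_left h]

theorem foldA (rest : List String) (out : String) (n : Nat) :
    (rest.foldl mfStep (min (n : Int) 4, out)).2 = out ++ mfStraight rest n := by
  induction rest generalizing out n with
  | nil => simp [mfStraight]
  | cons a t ih =>
      match n with
      | 0 =>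
          have := ih (out ++ a ++ ".") 1
          simp only [List.foldl_cons, mfStep] at *
          norm_num at *
          rw [this]; simp [mfStraight, mfPiece, mfSeps, String.append_assoc]
      | 1 =>
          have := ih (out ++ a ++ "- ") 2
          simp only [List.foldl_cons, mfStep] at *
          norm_num at *
          rw [this]; simp [mfStraight, mfPiece, mfSeps, String.append_assoc]
      | 2 =>
          have := ih (out ++ a ++ "- ") 3
          simp only [List.foldl_cons, mfStep] at *
          norm_num at *
          rw [this]; simp [mfStraight, mfPiece, mfSeps, String.append_assoc]
      | 3 =>
          have := ih (out ++ a) 4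
          simp only [List.foldl_cons, mfStep] at *
          norm_num at *
          rw [this]; simp [mfStraight, mfPiece, mfSeps, String.append_assoc]
      | (m + 4) =>
          have h4 : min ((m + 4 : Nat) : Int) 4 = 4 := by omega
          have h5 : min ((m + 5 : Nat) : Int) 4 = 4 := by omega
          have := ih (out ++ ("[" ++ a ++ "]\n")) (m + 5)
          rw [h5] at this
          simp only [List.foldl_cons, mfStep, h4]
          norm_num
          rw [this]
          simp [mfStraight, mfPiece, String.append_assoc]

-- ===== VERDICT (by name: the statement is the Claim_ definition above) =====
theorem mappingfunc_spec : Claim_equal_mappingfunc := by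
  intro s _
  unfold Spec_mappingfunc mappingfunc mappingfunc_alt
  have h := foldA s "" 0
  norm_num at h
  rw [h]
  match s with
  | [] => rfl
  | a :: t => rw [mfFmt_eq_straight]
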